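-- pv_equiv track=rewrite | github.com/olenmacias3241-design/dzpokerV3 | core/pot_manager.py | _winner_closest_to_dealer
-- ===== SOURCE A (Python) =====
-- def _winner_closest_to_dealer(winners, player_order, dealer_pid):
--     """在 winners 中返回离 dealer 最近的那位（player_order 顺时针，dealer 下一位最先）。"""
--     if not winners or not player_order or dealer_pid not in player_order:
--         return winners[0] if winners else None
--     n = len(player_order)
--     dealer_idx = player_order.index(dealer_pid)
--     # 从 dealer 下一位起顺时针，第一个在 winners 里的
--     for i in range(1, n + 1):
--         idx = (dealer_idx + i) % n
--         pid = player_order[idx]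
--         if pid in winners:
--             return pid
--     return winners[0]
-- ===== SOURCE B (Python) =====
-- def _winner_closest_to_dealer(winners, player_order, dealer_pid):
--     """Argmin over clockwise distances instead of a first-hit circular scan."""
--     if not winners:
--         return None
--     if dealer_pid not in player_order:
--         return winners[0]
--     n = len(player_order)
--     dealer_idx = player_order.index(dealer_pid)
--     wset = set(winners)
--     best = None
--     best_dist = None
--     for j, pid in enumerate(player_order):
--         if pid in wset:
--             dist = (j - dealer_idx - 1) % n + 1
--             if best_dist is None or dist < best_dist:
--                 best, best_dist = pid, dist
--     if best is None:
--         return winners[0]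
--     return best
-- ===== Notes on version B (the rewrite author's own statement) =====
-- stated objective: alternative
-- what changed: Replaces A's first-hit scan over seats in clockwise order from the dealer (modular indexing loop with early return) by a single pass over the seating list that computes each winner's clockwise distance from the dealer and keeps the argmin.
import Mathlib
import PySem

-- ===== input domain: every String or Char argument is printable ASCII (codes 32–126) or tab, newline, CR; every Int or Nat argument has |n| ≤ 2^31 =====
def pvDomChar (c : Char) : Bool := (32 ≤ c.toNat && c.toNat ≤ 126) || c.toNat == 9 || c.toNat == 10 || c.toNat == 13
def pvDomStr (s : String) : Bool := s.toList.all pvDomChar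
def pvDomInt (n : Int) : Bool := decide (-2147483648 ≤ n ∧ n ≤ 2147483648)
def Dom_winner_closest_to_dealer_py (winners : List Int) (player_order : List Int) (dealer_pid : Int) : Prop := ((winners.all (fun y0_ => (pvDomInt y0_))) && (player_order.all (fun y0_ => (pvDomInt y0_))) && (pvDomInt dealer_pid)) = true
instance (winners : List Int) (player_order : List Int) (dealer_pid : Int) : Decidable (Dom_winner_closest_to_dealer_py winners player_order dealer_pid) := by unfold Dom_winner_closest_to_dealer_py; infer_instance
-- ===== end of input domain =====

-- B replaces A's first-hit clockwise scan with an argmin over clockwise distances computed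
-- in one pass over the seats (objective: alternative decomposition, same cost).

-- ===== PORT A =====
def winner_closest_to_dealer_py (winners : List Int) (player_order : List Int) (dealer_pid : Int) : Option Int :=
  if winners = [] ∨ player_order = [] ∨ dealer_pid ∉ player_order then
    (if winners ≠ [] then winners.head? else none)
  else
    let n : Int := player_order.length
    let dealer_idx : Int := ((PySem.List.index? player_order dealer_pid).getD 0 : Nat)
    match (PySem.List.pyRange 1 (n + 1) 1).findSome? (fun i =>
      let idx := PySem.Int.mod (dealer_idx + i) n
      match PySem.List.pyGet? player_order idx with
      | some pid => if pid ∈ winners then some pid else none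
      | none => none) with
    | some pid => some pid
    | none => winners.head?

-- ===== PORT B =====
def winner_closest_to_dealer_py_alt (winners : List Int) (player_order : List Int) (dealer_pid : Int) : Option Int :=
  if winners.isEmpty then none
  else if dealer_pid ∉ player_order then winners.head?
  else
    let n : Int := player_order.length
    let dealer_idx : Int := ((PySem.List.index? player_order dealer_pid).getD 0 : Nat)
    let wset : PySem.Set Int := PySem.Set.ofList winners
    let best := (PySem.List.enumerate player_order 0).foldl
      (fun (acc : Option (Int × Int)) jp =>
        if jp.2 ∈ wset then
          let dist := PySem.Int.mod (jp.1 - dealer_idx - 1) n + 1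
          match acc with
          | none => some (jp.2, dist)
          | some b => if dist < b.2 then some (jp.2, dist) else acc
        else acc) none
    match best with
    | some b => some b.1
    | none => winners.head?

-- ===== PRECONDITION & SPEC =====
def Spec_winner_closest_to_dealer_py (winners : List Int) (player_order : List Int) (dealer_pid : Int) (out : Option Int) : Prop := out = winner_closest_to_dealer_py_alt winners player_order dealer_pid
instance (winners : List Int) (player_order : List Int) (dealer_pid : Int) (out : Option Int) : Decidable (Spec_winner_closest_to_dealer_py winners player_order dealer_pid out) := by unfold Spec_winner_closest_to_dealer_py; infer_instance

-- ===== CLAIM (what is proved, stated in full; the proofs are below) =====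
def Claim_equal_winner_closest_to_dealer_py : Prop := ∀ (winners : List Int) (player_order : List Int) (dealer_pid : Int), Dom_winner_closest_to_dealer_py winners player_order dealer_pid → Spec_winner_closest_to_dealer_py winners player_order dealer_pid (winner_closest_to_dealer_py winners player_order dealer_pid)

-- ===== LEMMAS AND PROOFS =====

-- the min-update step of B's fold
def pvUpd (acc : Option (Int × Int)) (c : Int × Int) : Option (Int × Int) :=
  match acc with
  | none => some c
  | some b => if c.2 < b.2 then some c else acc

theorem pvFindSome?_eq_head?_filterMap {α β : Type} (f : α → Option β) (l : List α) :
    l.findSome? f = (l.filterMap f).head? := by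
  induction l with
  | nil => rfl
  | cons a t ih =>
    rw [List.findSome?_cons, List.filterMap_cons]
    cases h : f a
    · simp only at ih ⊢; exact ih
    · rfl

theorem pvFoldl_step_filterMap {α : Type} (f : α → Option (Int × Int)) :
    ∀ (xs : List α) (acc : Option (Int × Int)),
      xs.foldl (fun acc jp => match f jp with | some c => pvUpd acc c | none => acc) acc
        = (xs.filterMap f).foldl pvUpd acc := by
  intro xs
  induction xs with
  | nil => intro acc; rfl
  | cons a t ih =>
    intro acc
    rw [List.foldl_cons, List.filterMap_cons]
    cases h : f a
    · exact ih acc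
    · rw [List.foldl_cons]; exact ih _

theorem pvMinFold_keep (m : Int × Int) :
    ∀ (c : List (Int × Int)), (∀ x ∈ c, x = m ∨ m.2 < x.2) → c.foldl pvUpd (some m) = some m := by
  intro c
  induction c with
  | nil => intro _; rfl
  | cons a t ih =>
    intro h
    have ha := h a (by simp)
    have : pvUpd (some m) a = some m := by
      rcases ha with rfl | hlt
      · simp [pvUpd]
      · simp [pvUpd, not_lt.mpr (le_of_lt hlt)]
    rw [List.foldl_cons, this]
    exact ih (fun x hx => h x (by simp [hx]))

theorem pvMinFold_some (m : Int × Int) :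
    ∀ (c : List (Int × Int)) (b : Int × Int), m ∈ c → (∀ x ∈ c, x = m ∨ m.2 < x.2) → m.2 < b.2 →
      c.foldl pvUpd (some b) = some m := by
  intro c
  induction c with
  | nil => intro b hm; simp at hm
  | cons a t ih =>
    intro b hm h hb
    rw [List.foldl_cons]
    rcases h a (by simp) with rfl | hlt
    · -- a = m : accumulator becomes some m and stays
      simp only [pvUpd, if_pos hb]
      exact pvMinFold_keep a t (fun x hx => h x (by simp [hx]))
    · have hm' : m ∈ t := by
        rcases List.mem_cons.mp hm with h' | h'
        · exact absurd (h' ▸ hlt) (lt_irrefl _)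
        · exact h'
      have h' : ∀ x ∈ t, x = m ∨ m.2 < x.2 := fun x hx => h x (by simp [hx])
      by_cases hab : a.2 < b.2
      · simp only [pvUpd, if_pos hab]
        exact ih a hm' h' hlt
      · simp only [pvUpd, if_neg hab]
        exact ih b hm' h' hb

theorem pvMinFold_none (m : Int × Int) :
    ∀ (c : List (Int × Int)), m ∈ c → (∀ x ∈ c, x = m ∨ m.2 < x.2) →
      c.foldl pvUpd none = some m := by
  intro c
  induction c with
  | nil => intro hm; simp at hm
  | cons a t ih =>
    intro hm h
    rw [List.foldl_cons]
    show t.foldl pvUpd (some a) = some m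
    rcases h a (by simp) with rfl | hlt
    · exact pvMinFold_keep a t (fun x hx => h x (by simp [hx]))
    · have hm' : m ∈ t := by
        rcases List.mem_cons.mp hm with h' | h'
        · exact absurd (h' ▸ hlt) (lt_irrefl _)
        · exact h'
      exact pvMinFold_some m t a hm' (fun x hx => h x (by simp [hx])) hlt

-- clockwise scan order: the map i ↦ (D+i) % n over [1..n] is the rotation of [0..n)
theorem pvRotMap (D n : Int) (h0 : 0 ≤ D) (hD : D < n) :
    (PySem.List.pyRange 1 (n+1) 1).map (fun i => PySem.Int.mod (D + i) n)
      = PySem.List.pyRange (D+1) n 1 ++ PySem.List.pyRange 0 (D+1) 1 := by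
  rw [PySem.List.pyRange_one_append 1 (n - D) (n + 1) (by omega) (by omega), List.map_append]
  congr 1
  · rw [PySem.List.pyRange_one 1 (n - D), PySem.List.pyRange_one (D+1) n, List.map_map]
    have ht : (n - D - 1).toNat = (n - (D+1)).toNat := by omega
    rw [show ((n - D) - 1) = (n - D - 1) by ring, ht]
    apply List.map_congr_left
    intro k hk
    rw [List.mem_range] at hk
    have hk' : (k : Int) < n - (D + 1) := by omega
    show PySem.Int.mod (D + (1 + (k : Int))) n = D + 1 + (k : Int)
    rw [PySem.Int.mod_eq_emod_of_pos (by omega), Int.emod_eq_of_lt (by omega) (by omega)]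
    ring
  · rw [PySem.List.pyRange_one (n - D) (n + 1), PySem.List.pyRange_one 0 (D+1), List.map_map]
    have ht : (n + 1 - (n - D)).toNat = (D + 1 - 0).toNat := by omega
    rw [ht]
    apply List.map_congr_left
    intro k hk
    rw [List.mem_range] at hk
    have hk' : (k : Int) < D + 1 := by omega
    show PySem.Int.mod (D + ((n - D) + (k : Int))) n = 0 + (k : Int)
    rw [PySem.Int.mod_eq_emod_of_pos (by omega),
        show D + ((n - D) + (k : Int)) = (k : Int) + n * 1 by ring,
        Int.add_mul_emod_self_left, Int.emod_eq_of_lt (by omega) (by omega)]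
    ring

theorem pvSigmaPerm (D n : Int) (h0 : 0 ≤ D) (hD : D < n) :
    ((PySem.List.pyRange 1 (n+1) 1).map (fun i => PySem.Int.mod (D + i) n)).Perm
      (PySem.List.pyRange 0 n 1) := by
  rw [pvRotMap D n h0 hD,
      PySem.List.pyRange_one_append 0 (D+1) n (by omega) (by omega)]
  exact List.perm_append_comm

-- the distance of the seat scanned at step i is i
theorem pvSnd (D n i : Int) (h0 : 0 ≤ D) (hD : D < n) (h1 : 1 ≤ i) (h2 : i ≤ n) :
    PySem.Int.mod (PySem.Int.mod (D + i) n - D - 1) n + 1 = i := by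
  rw [PySem.Int.mod_eq_emod_of_pos (by omega), PySem.Int.mod_eq_emod_of_pos (by omega),
      show (D + i) % n - D - 1 = (D + i) % n - (D + 1) by ring,
      Int.sub_emod ((D + i) % n), Int.emod_emod_of_dvd _ dvd_rfl, ← Int.sub_emod,
      show (D + i) - (D + 1) = i - 1 by ring,
      Int.emod_eq_of_lt (by omega) (by omega)]
  ring

-- ===== VERDICT (by name: the statement is the Claim_ definition above) =====
theorem winner_closest_to_dealer_py_spec : Claim_equal_winner_closest_to_dealer_py := by
  intro w l dealer _hdom
  show winner_closest_to_dealer_py w l dealer = winner_closest_to_dealer_py_alt w l dealer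
  by_cases hw : w = []
  · subst hw
    simp [winner_closest_to_dealer_py, winner_closest_to_dealer_py_alt]
  by_cases hmem : dealer ∈ l
  case neg =>
    simp [winner_closest_to_dealer_py, winner_closest_to_dealer_py_alt, hw, hmem]
  case pos =>
  have hl : l ≠ [] := by rintro rfl; simp at hmem
  obtain ⟨k, hk⟩ : ∃ k, PySem.List.index? l dealer = some k :=
    Option.isSome_iff_exists.mp ((PySem.List.index?_isSome_iff l dealer).mpr hmem)
  have hkn : k < l.length := by
    obtain ⟨pre, suf, hsplit, hlen, -⟩ := (PySem.List.index?_eq_some_iff l dealer k).mp hk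
    subst hsplit; simp [← hlen]
  have hcondA : ¬ (w = [] ∨ l = [] ∨ dealer ∉ l) := by
    rintro (h | h | h)
    exacts [hw h, hl h, h hmem]
  have hwB : w.isEmpty = false := by simp [hw]
  simp only [winner_closest_to_dealer_py, winner_closest_to_dealer_py_alt, hk, Option.getD_some,
    if_neg hcondA, hwB, Bool.false_eq_true, if_false, if_neg (not_not_intro hmem)]
  -- names for the pieces
  set n : Int := (l.length : Int) with hn
  set D : Int := (k : Int) with hD
  have h0D : 0 ≤ D := by simp [hD]
  have hDn : D < n := by rw [hD, hn]; exact_mod_cast hkn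
  have hnpos : (0:Int) < n := by omega
  set g : Int → Option (Int × Int) := fun j =>
    if PySem.List.pyGetD l j 0 ∈ w then
      some (PySem.List.pyGetD l j 0, PySem.Int.mod (j - D - 1) n + 1)
    else none with hg
  set σ : Int → Int := fun i => PySem.Int.mod (D + i) n with hσ
  have hσrange : ∀ i : Int, 0 ≤ σ i ∧ σ i < n := fun i =>
    ⟨PySem.Int.mod_nonneg _ hnpos, PySem.Int.mod_lt _ hnpos⟩
  -- A side: findSome? = head? of S mapped to fst
  set S : List (Int × Int) := (PySem.List.pyRange 1 (n+1) 1).filterMap (fun i => g (σ i)) with hS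
  have hA : (PySem.List.pyRange 1 (n+1) 1).findSome? (fun i =>
      match PySem.List.pyGet? l (PySem.Int.mod (D + i) n) with
      | some pid => if pid ∈ w then some pid else none
      | none => none) = (S.head?).map Prod.fst := by
    have hf : ∀ i : Int, (match PySem.List.pyGet? l (PySem.Int.mod (D + i) n) with
        | some pid => if pid ∈ w then some pid else none
        | none => none) = Option.map Prod.fst (g (σ i)) := by
      intro i
      obtain ⟨hge0, hltn⟩ := hσrange i
      rw [hσ]
      rw [PySem.List.pyGet?_eq_some_getElem l hge0 (by omega)]
      rw [hg]
      simp only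
      rw [PySem.List.pyGetD_eq_getElem l 0 hge0 (by omega)]
      by_cases hmw : l[(PySem.Int.mod (D + i) n).toNat] ∈ w <;> simp
    calc (PySem.List.pyRange 1 (n+1) 1).findSome? _
        = (PySem.List.pyRange 1 (n+1) 1).findSome? (fun i => Option.map Prod.fst (g (σ i))) := by
          exact congrFun (congrArg List.findSome? (funext hf)) _
      _ = ((PySem.List.pyRange 1 (n+1) 1).filterMap (fun i => Option.map Prod.fst (g (σ i)))).head? :=
          pvFindSome?_eq_head?_filterMap _ _
      _ = ((S.map Prod.fst)).head? := by rw [hS, List.map_filterMap]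
      _ = (S.head?).map Prod.fst := List.head?_map
  rw [hA]
  -- B side: foldl over enumerate = min-fold over the candidate list cB
  set cB : List (Int × Int) := (PySem.List.pyRange 0 n 1).filterMap g with hcB
  have hB : (PySem.List.enumerate l).foldl (fun (acc : Option (Int × Int)) jp =>
      if jp.2 ∈ PySem.Set.ofList w then
        match acc with
        | none => some (jp.2, PySem.Int.mod (jp.1 - D - 1) n + 1)
        | some b => if PySem.Int.mod (jp.1 - D - 1) n + 1 < b.2 then
            some (jp.2, PySem.Int.mod (jp.1 - D - 1) n + 1) else acc
      else acc) none = cB.foldl pvUpd none := by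
    rw [PySem.List.enumerate_eq_map_pyRange l 0, List.foldl_map]
    have hlen' : PySem.List.len l = n := by simp [PySem.List.len_eq, hn]
    rw [hlen']
    have hstep : (fun (acc : Option (Int × Int)) (j : Int) =>
        if (j, PySem.List.pyGetD l j 0).2 ∈ PySem.Set.ofList w then
          match acc with
          | none => some ((j, PySem.List.pyGetD l j 0).2,
              PySem.Int.mod ((j, PySem.List.pyGetD l j 0).1 - D - 1) n + 1)
          | some b => if PySem.Int.mod ((j, PySem.List.pyGetD l j 0).1 - D - 1) n + 1 < b.2 then
              some ((j, PySem.List.pyGetD l j 0).2,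
                PySem.Int.mod ((j, PySem.List.pyGetD l j 0).1 - D - 1) n + 1) else acc
          else acc)
        = (fun acc j => match g j with | some c => pvUpd acc c | none => acc) := by
      funext acc j
      by_cases hmw : PySem.List.pyGetD l j 0 ∈ w <;>
        cases acc <;> simp only [hg, PySem.Set.mem_ofList, hmw, if_true, if_false, pvUpd]
    rw [hstep, pvFoldl_step_filterMap g _ none, hcB]
  rw [hB]
  -- S is a permutation of cB
  have hperm : S.Perm cB := by
    rw [hS, hcB, show (fun i => g (σ i)) = g ∘ σ from rfl, ← List.filterMap_map]
    exact (pvSigmaPerm D n h0D hDn).filterMap g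
  -- distances along S are the step numbers, hence strictly increasing
  have hsnd : ∀ i ∈ PySem.List.pyRange 1 (n+1) 1, ∀ p : Int × Int, g (σ i) = some p → p.2 = i := by
    intro i hi p hp
    rw [PySem.List.mem_pyRange_one] at hi
    rw [hg, hσ] at hp
    simp only at hp
    split at hp
    · cases hp
      exact pvSnd D n i h0D hDn (by omega) (by omega)
    · cases hp
  have hpair : S.Pairwise (fun p q => p.2 < q.2) := by
    rw [hS]
    rw [List.pairwise_filterMap]
    refine (PySem.List.pairwise_lt_pyRange_one 1 (n+1)).imp_of_mem ?_
    intro a b ha hb hab p hp q hq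
    rw [hsnd a ha p hp, hsnd b hb q hq]
    exact hab
  -- conclude by cases on S
  cases hSc : S with
  | nil =>
    have hcBnil : cB = [] := ((hSc ▸ hperm : List.Perm ([] : List (Int × Int)) cB).symm).eq_nil
    rw [hcBnil]
    rfl
  | cons m rest =>
    have hmS : m ∈ S := by rw [hSc]; exact List.mem_cons_self
    have hmcB : m ∈ cB := hperm.mem_iff.mp hmS
    have hmin : ∀ x ∈ cB, x = m ∨ m.2 < x.2 := by
      intro x hx
      have hxS : x ∈ S := hperm.mem_iff.mpr hx
      rw [hSc] at hxS
      rcases List.mem_cons.mp hxS with h' | h'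
      · exact Or.inl h'
      · right
        have := hpair
        rw [hSc, List.pairwise_cons] at this
        exact this.1 x h'
    rw [pvMinFold_none m cB hmcB hmin]
    rfl
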